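-- pv_equiv track=rewrite | github.com/nguyencaohiep/Python | PY01057.py | check
-- ===== SOURCE A (Python) =====
-- import math
--
-- def prime(n):
--     if n < 2:
--         return False
--     else:
--         if n > 3:
--             for i in range(2, int(math.sqrt(n)) + 1):
--                 if n % i == 0:
--                     return False
--     return True
--
-- def check(n):
--     for i in range(len(n)):
--         if (prime(i) == True):
--             if prime(n[i]) == False:
--                 return False
--         if(prime(i) == False):
--             if prime(n[i]) == True:
--                 return False
--     return True
-- ===== SOURCE B (Python) =====
-- def _is_prime_val(v):
--     if v < 2:
--         return False
--     d = 2
--     while d * d <= v: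
--         if v % d == 0:
--             return False
--         d += 1
--     return True
--
-- def check(n):
--     L = len(n)
--     sieve = [True] * L
--     for k in (0, 1):
--         if k < L:
--             sieve[k] = False
--     for p in range(2, L):
--         for q in range(2 * p, L, p):
--             sieve[q] = False
--     return all(sieve[i] == _is_prime_val(v) for i, v in enumerate(n))
-- ===== Notes on version B (the rewrite author's own statement) =====
-- stated objective: alternative
-- what changed: Index-primality is precomputed once with a sieve table (marking all multiples of each p in range(2,len(n))) and values are tested by a d*d<=v while-loop, then one comparison pass over enumerate(n), instead of A's per-index sqrt-bounded trial division inside the loop.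
import Mathlib
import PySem

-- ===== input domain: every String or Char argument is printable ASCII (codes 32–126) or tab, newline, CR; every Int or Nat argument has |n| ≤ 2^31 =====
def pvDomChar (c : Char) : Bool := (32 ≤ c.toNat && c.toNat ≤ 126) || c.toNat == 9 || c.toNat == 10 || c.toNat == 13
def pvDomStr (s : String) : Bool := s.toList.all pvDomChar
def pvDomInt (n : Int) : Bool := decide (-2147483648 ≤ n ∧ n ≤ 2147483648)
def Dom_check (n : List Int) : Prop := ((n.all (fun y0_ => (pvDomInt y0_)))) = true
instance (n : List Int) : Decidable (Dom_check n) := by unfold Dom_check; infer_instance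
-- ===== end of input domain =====

-- B replaces A's per-index trial-division primality test by a sieve table over the indices
-- and a while-loop (d*d ≤ v) trial division for the values; objective: alternative structure.

-- ===== PORT A =====
-- A's prime(n): int(math.sqrt(n)) is ported as Nat.sqrt n.toNat; exact on the domain
-- |n| ≤ 2^31 (math.sqrt is exact on perfect squares there, so truncation agrees with isqrt).
def primeA (n : Int) : Bool :=
  if n < 2 then false
  else
    if n > 3 then
      if (PySem.List.pyRange 2 (((Nat.sqrt n.toNat : Nat) : Int) + 1) 1).any
          (fun i => PySem.Int.mod n i == 0) then false
      else true
    else true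

def checkLoopA (n : List Int) : List Int → Bool
  | [] => true
  | i :: rest =>
    if primeA i && !primeA ((PySem.List.pyGet? n i).getD 0) then false
    else if !primeA i && primeA ((PySem.List.pyGet? n i).getD 0) then false
    else checkLoopA n rest

def check (n : List Int) : Bool :=
  checkLoopA n (PySem.List.pyRange 0 (n.length : Int) 1)

-- ===== PORT B =====
-- B's _is_prime_val while-loop (the 0 < d part of the guard is only a totality guard;
-- d starts at 2 and only increases).
def primeBLoop (v : Int) (d : Int) : Bool :=
  if h : d * d ≤ v ∧ 0 < d then
    if PySem.Int.mod v d == 0 then false else primeBLoop v (d + 1)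
  else true
termination_by (v + 1 - d).toNat
decreasing_by
  have h1 : d ≤ d * d := le_mul_of_one_le_left (by omega) (by omega)
  omega

def primeB (v : Int) : Bool := if v < 2 then false else primeBLoop v 2

-- B's inner loop `for q in range(2*p, L, p): sieve[q] = False` (0 < p is a totality guard;
-- p ranges over 2..L-1).
def pvMark (a : Array Bool) (p q : Nat) : Array Bool :=
  if h : q < a.size ∧ 0 < p then pvMark (a.set q false h.1) p (q + p) else a
termination_by a.size - q
decreasing_by simp; omega

def buildSieve (L : Nat) : Array Bool :=
  let a := ((Array.replicate L true).setIfInBounds 0 false).setIfInBounds 1 false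
  (List.range' 2 (L - 2)).foldl (fun a p => pvMark a p (2 * p)) a

def check_alt (n : List Int) : Bool :=
  let s := buildSieve n.length
  (PySem.List.enumerate n).all (fun iv => s[iv.1.toNat]! == primeB iv.2)

-- ===== PRECONDITION & SPEC =====
def Spec_check (n : List Int) (out : Bool) : Prop := out = check_alt n
instance (n : List Int) (out : Bool) : Decidable (Spec_check n out) := by unfold Spec_check; infer_instance

-- ===== CLAIM (what is proved, stated in full; the proofs are below) =====
def Claim_equal_check : Prop := ∀ (n : List Int), Dom_check n → Spec_check n (check n)

-- ===== LEMMAS AND PROOFS =====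

-- ---- the two trial-division tests both decide Nat.Prime ∘ Int.toNat ----

theorem primeBLoop_iff (v : Int) (d : Int) (hd : 2 ≤ d) :
    primeBLoop v d = true ↔ ∀ e : Int, d ≤ e → e * e ≤ v → ¬ e ∣ v := by
  revert hd
  fun_induction primeBLoop v d with
  | case1 d h hmod =>
    intro hd
    have hdvd : d ∣ v := (PySem.Int.mod_eq_zero_iff_dvd v d).mp (by simpa using hmod)
    simp only [Bool.false_eq_true, false_iff]
    intro hall
    exact hall d le_rfl h.1 hdvd
  | case2 d h hmod ih =>
    intro hd
    rw [ih (by omega)]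
    have hnd : ¬ d ∣ v := fun hdvd => by
      simp [(PySem.Int.mod_eq_zero_iff_dvd v d).mpr hdvd] at hmod
    constructor
    · intro hall e he hee
      rcases eq_or_lt_of_le he with rfl | hlt
      · exact hnd
      · exact hall e (by omega) hee
    · intro hall e he hee
      exact hall e (by omega) hee
  | case3 d h =>
    intro hd
    constructor
    · intro _ e he hee hdvd
      have h1 : d * d ≤ e * e := mul_le_mul he he (by omega) (by omega)
      have h2 : ¬ d * d ≤ v := fun hc => h ⟨hc, by omega⟩
      omega
    · intro _; rfl

theorem not_prime_toNat_of_lt_two (v : Int) (hv : v < 2) : ¬ Nat.Prime v.toNat := by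
  have : v.toNat = 0 ∨ v.toNat = 1 := by omega
  rcases this with h | h <;> rw [h] <;> simp [Nat.not_prime_zero, Nat.not_prime_one]

theorem nat_prime_iff_no_small_div (m : Nat) (hm : 2 ≤ m) :
    Nat.Prime m ↔ ∀ k : Nat, 2 ≤ k → k * k ≤ m → ¬ k ∣ m := by
  rw [Nat.prime_def_le_sqrt]
  constructor
  · intro ⟨_, h⟩ k hk hkk; exact h k hk (Nat.le_sqrt.mpr hkk)
  · intro h; exact ⟨hm, fun k hk hks => h k hk (Nat.le_sqrt.mp hks)⟩

theorem primeB_eq (v : Int) : primeB v = decide (Nat.Prime v.toNat) := by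
  rw [primeB]
  split_ifs with h
  · simp [not_prime_toNat_of_lt_two v h]
  · push_neg at h
    rw [Bool.eq_iff_iff, primeBLoop_iff v 2 le_rfl, decide_eq_true_eq,
      nat_prime_iff_no_small_div v.toNat (by omega)]
    constructor
    · intro hall k hk hkk hdvd
      refine hall (k : Int) (by exact_mod_cast hk) ?_ ?_
      · have : ((k * k : Nat) : Int) ≤ ((v.toNat : Nat) : Int) := by exact_mod_cast hkk
        push_cast at this; omega
      · have : (k : Int) ∣ ((v.toNat : Nat) : Int) := Int.natCast_dvd_natCast.mpr hdvd
        rwa [Int.toNat_of_nonneg (by omega)] at this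
    · intro hall e he hee hdvd
      have hkv : e.toNat ∣ v.toNat := by
        have : e.toNat * (v / e).toNat = v.toNat := by
          rcases hdvd with ⟨c, rfl⟩
          have hc : 0 ≤ c := by nlinarith
          rw [Int.mul_ediv_cancel_left _ (by omega)]
          rw [← Int.toNat_mul (by omega) hc]
        exact ⟨(v / e).toNat, this.symm⟩
      refine hall e.toNat (by omega) ?_ hkv
      have : (e.toNat : Int) * (e.toNat : Int) ≤ (v.toNat : Int) := by
        rw [Int.toNat_of_nonneg (by omega), Int.toNat_of_nonneg (by omega)]; exact hee
      exact_mod_cast this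

theorem primeA_eq (n : Int) : primeA n = decide (Nat.Prime n.toNat) := by
  rw [primeA]
  split_ifs with h1 h2 hany
  · simp [not_prime_toNat_of_lt_two n h1]
  · -- n > 3 and some divisor 2 ≤ i ≤ sqrt found : not prime
    rw [eq_comm, decide_eq_false_iff_not]
    rw [List.any_eq_true] at hany
    obtain ⟨i, hmem, hdiv⟩ := hany
    rw [PySem.List.mem_pyRange_one] at hmem
    have hdvd : i ∣ n := (PySem.Int.mod_eq_zero_iff_dvd n i).mp (by simpa using hdiv)
    rw [nat_prime_iff_no_small_div n.toNat (by omega)]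
    intro hall
    have hks : i.toNat * i.toNat ≤ n.toNat := by
      have h4 : i.toNat ≤ Nat.sqrt n.toNat := by omega
      have := Nat.le_sqrt.mp h4
      omega
    have hkd : i.toNat ∣ n.toNat := by
      rcases hdvd with ⟨c, rfl⟩
      have hc : 0 ≤ c := by nlinarith
      refine ⟨c.toNat, ?_⟩
      rw [← Int.toNat_mul (by omega) hc]
    exact hall i.toNat (by omega) hks hkd
  · -- n > 3 and no divisor up to sqrt : prime
    rw [eq_comm, decide_eq_true_eq]
    rw [List.any_eq_true] at hany
    push_neg at hany
    rw [nat_prime_iff_no_small_div n.toNat (by omega)]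
    intro k hk hkk hkd
    have hmem : (k : Int) ∈ PySem.List.pyRange 2 (((Nat.sqrt n.toNat : Nat) : Int) + 1) 1 := by
      rw [PySem.List.mem_pyRange_one]
      have : k ≤ Nat.sqrt n.toNat := Nat.le_sqrt.mpr hkk
      omega
    have hdvd : (k : Int) ∣ n := by
      have : (k : Int) ∣ ((n.toNat : Nat) : Int) := Int.natCast_dvd_natCast.mpr hkd
      rwa [Int.toNat_of_nonneg (by omega)] at this
    have := hany (k : Int) hmem
    rw [(PySem.Int.mod_eq_zero_iff_dvd n (k : Int)).mpr hdvd] at this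
    simp at this
  · -- 2 ≤ n ≤ 3 : prime
    rw [eq_comm, decide_eq_true_eq]
    have : n = 2 ∨ n = 3 := by omega
    rcases this with rfl | rfl
    · exact Nat.prime_two
    · exact Nat.prime_three

-- ---- sieve correctness ----

theorem pvMark_size (a : Array Bool) (p q : Nat) : (pvMark a p q).size = a.size := by
  fun_induction pvMark a p q with
  | case1 a q h ih => rw [ih]; simp
  | case2 a q h => rfl

theorem pvMark_unmarked (a : Array Bool) (p q i : Nat) (hni : ¬ ∃ k, i = q + k * p) :
    (pvMark a p q)[i]? = a[i]? := by
  revert hni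
  fun_induction pvMark a p q with
  | case1 a q h ih =>
    intro hni
    rw [ih (by
      rintro ⟨k, rfl⟩
      exact hni ⟨k + 1, by ring⟩)]
    rw [Array.getElem?_set]
    have : q ≠ i := fun he => hni ⟨0, by omega⟩
    simp [this]
  | case2 a q h => intro _; rfl

theorem pvMark_false (a : Array Bool) (p q i : Nat) (hf : a[i]? = some false) :
    (pvMark a p q)[i]? = some false := by
  revert hf
  fun_induction pvMark a p q with
  | case1 a q h ih =>
    intro hf
    apply ih
    rw [Array.getElem?_set]
    split <;> simp [hf]
  | case2 a q h => intro hf; exact hf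

theorem pvMark_marked (a : Array Bool) (p q i : Nat) (hp : 0 < p)
    (hk : ∃ k, i = q + k * p) (hi : i < a.size) :
    (pvMark a p q)[i]? = some false := by
  revert hk hi
  fun_induction pvMark a p q with
  | case1 a q h ih =>
    rintro ⟨k, rfl⟩ hi
    match k with
    | 0 =>
      rw [pvMark_unmarked _ p (q + p) _ (by
        rintro ⟨k', he⟩
        have h0 : 0 ≤ k' * p := Nat.zero_le _
        omega)]
      rw [Array.getElem?_set]
      simp
    | k + 1 =>
      apply ih ⟨k, by ring⟩
      simpa using hi
  | case2 a q h =>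
    rintro ⟨k, rfl⟩ hi
    have h0 : 0 ≤ k * p := Nat.zero_le _
    exact absurd ⟨by omega, hp⟩ h

theorem sieveFold_size (ps : List Nat) (a : Array Bool) :
    (ps.foldl (fun a p => pvMark a p (2 * p)) a).size = a.size := by
  induction ps generalizing a with
  | nil => rfl
  | cons p ps ih => rw [List.foldl_cons, ih, pvMark_size]

theorem sieveFold_false (ps : List Nat) (a : Array Bool) (i : Nat)
    (hf : a[i]? = some false) :
    (ps.foldl (fun a p => pvMark a p (2 * p)) a)[i]? = some false := by
  induction ps generalizing a with
  | nil => exact hf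
  | cons p ps ih => rw [List.foldl_cons]; exact ih _ (pvMark_false _ _ _ _ hf)

theorem sieveFold_unmarked (ps : List Nat) (a : Array Bool) (i : Nat)
    (hni : ∀ p ∈ ps, ¬ ∃ k, i = 2 * p + k * p) :
    (ps.foldl (fun a p => pvMark a p (2 * p)) a)[i]? = a[i]? := by
  induction ps generalizing a with
  | nil => rfl
  | cons p ps ih =>
    rw [List.foldl_cons, ih _ (fun p hp => hni p (List.mem_cons_of_mem _ hp)),
      pvMark_unmarked _ _ _ _ (hni p (List.mem_cons_self))]

theorem sieveFold_marked (ps : List Nat) (i p : Nat) (hp : 0 < p)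
    (hk : ∃ k, i = 2 * p + k * p) :
    ∀ a : Array Bool, p ∈ ps → i < a.size →
      (ps.foldl (fun a p => pvMark a p (2 * p)) a)[i]? = some false := by
  induction ps with
  | nil => intro a hmem _; cases hmem
  | cons p2 ps ih =>
    intro a hmem hi
    rw [List.foldl_cons]
    rcases List.mem_cons.mp hmem with rfl | hmem2
    · exact sieveFold_false _ _ _ (pvMark_marked _ _ _ _ hp hk hi)
    · exact ih _ hmem2 (by rw [pvMark_size]; exact hi)

theorem sieve_init_get (L i : Nat) (hi : i < L) :
    (((Array.replicate L true).setIfInBounds 0 false).setIfInBounds 1 false)[i]? =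
      some (decide (2 ≤ i)) := by
  rw [Array.getElem?_setIfInBounds, Array.getElem?_setIfInBounds, Array.getElem?_replicate]
  simp only [Array.size_setIfInBounds, Array.size_replicate]
  split_ifs <;> (try omega) <;>
    (congr 1; rw [eq_comm]
     first
       | (rw [decide_eq_false_iff_not]; omega)
       | (rw [decide_eq_true_eq]; omega))

theorem sieve_size (L : Nat) : (buildSieve L).size = L := by
  simp only [buildSieve]
  rw [sieveFold_size]
  simp

theorem sieve_get? (L i : Nat) (hi : i < L) :
    (buildSieve L)[i]? = some (decide (Nat.Prime i)) := by
  simp only [buildSieve]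
  by_cases h2 : 2 ≤ i
  · by_cases hpr : Nat.Prime i
    · -- prime: never marked
      rw [sieveFold_unmarked _ _ _ (by
        intro p hp hex
        rw [List.mem_range'_1] at hp
        obtain ⟨k, hik⟩ := hex
        have hdvd : p ∣ i := ⟨2 + k, by rw [hik]; ring⟩
        rcases (Nat.Prime.eq_one_or_self_of_dvd hpr p hdvd) with h1 | h1
        · omega
        · have h0 : 0 ≤ k * p := Nat.zero_le _
          omega)]
      rw [sieve_init_get L i hi]
      simp [h2, hpr]
    · -- composite: marked by a proper divisor
      obtain ⟨p, hdvd, hp2, hplt⟩ := Nat.exists_dvd_of_not_prime2 h2 hpr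
      obtain ⟨c, hc⟩ := hdvd
      have hc2 : 2 ≤ c := by
        rcases Nat.lt_or_ge c 2 with h | h
        · interval_cases c <;> omega
        · exact h
      rw [sieveFold_marked _ i p (by omega)
        ⟨c - 2, by
          rw [hc]
          calc p * c = (2 + (c - 2)) * p := by rw [show 2 + (c - 2) = c by omega]; ring
          _ = 2 * p + (c - 2) * p := by ring⟩
        _ (by rw [List.mem_range'_1]; omega)
        (by simp; omega)]
      simp [hpr]
  · -- i = 0 or 1 : false from the start, preserved
    rw [sieveFold_false _ _ _ (by rw [sieve_init_get L i hi]; simp; omega)]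
    have : i = 0 ∨ i = 1 := by omega
    rcases this with rfl | rfl <;> simp [Nat.not_prime_zero, Nat.not_prime_one]

theorem sieve_get (L i : Nat) (hi : i < L) :
    (buildSieve L)[i]! = decide (Nat.Prime i) := by
  have hs : i < (buildSieve L).size := by rw [sieve_size]; exact hi
  rw [getElem!_pos (buildSieve L) i hs]
  have := sieve_get? L i hi
  rw [Array.getElem?_eq_getElem hs] at this
  exact Option.some_injective _ this

-- ---- assembling the two checks ----

theorem checkLoopA_eq (n : List Int) (is : List Int) :
    checkLoopA n is =
      is.all (fun i => primeA i == primeA ((PySem.List.pyGet? n i).getD 0)) := by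
  induction is with
  | nil => rfl
  | cons i rest ih =>
    rw [checkLoopA, List.all_cons]
    cases hA : primeA i <;> cases hB : primeA ((PySem.List.pyGet? n i).getD 0) <;>
      simp [hA, hB, ih]

theorem check_iff (n : List Int) :
    check n = true ↔
      ∀ k, (hk : k < n.length) → (Nat.Prime k ↔ Nat.Prime (n[k]).toNat) := by
  rw [check, checkLoopA_eq, PySem.List.pyRange_one]
  simp only [Int.sub_zero, Int.toNat_natCast, List.all_map, List.all_eq_true, List.mem_range,
    Function.comp_apply, zero_add, primeA_eq, PySem.List.pyGet?_natCast]
  constructor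
  · intro h k hk
    have := h k hk
    rw [List.getElem?_eq_getElem hk] at this
    simpa using this
  · intro h k hk
    rw [List.getElem?_eq_getElem hk]
    simpa using h k hk

theorem check_alt_iff (n : List Int) :
    check_alt n = true ↔
      ∀ k, (hk : k < n.length) → (Nat.Prime k ↔ Nat.Prime (n[k]).toNat) := by
  rw [check_alt]
  simp only [List.all_eq_true]
  constructor
  · intro h k hk
    have := h (((k : Nat) : Int), n[k]) (by
      rw [PySem.List.mem_enumerate_iff]
      exact ⟨k, hk, by simp⟩)
    simp only [Int.toNat_natCast] at this
    rw [sieve_get n.length k hk, primeB_eq] at this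
    simpa using this
  · intro h p hp
    rw [PySem.List.mem_enumerate_iff] at hp
    obtain ⟨k, hk, rfl⟩ := hp
    simp only [zero_add, Int.toNat_natCast]
    rw [sieve_get n.length k hk, primeB_eq]
    simpa using h k hk

-- ===== VERDICT (by name: the statement is the Claim_ definition above) =====
theorem check_spec : Claim_equal_check := by
  intro n _
  unfold Spec_check
  rw [Bool.eq_iff_iff, check_iff, ← check_alt_iff]
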